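-- pv_equiv track=rewrite | github.com/brizrak/game-bot | app/bot/handlers/fool/fool.py | target_is_valid_deck
-- ===== SOURCE A (Python) =====
-- def target_is_valid_deck(given_deck, trump_type):
--     has_trump_card_flag = 0
--     for element in given_deck:
--         if element[0] == trump_type:
--             has_trump_card_flag = 1
--         if not (element[1] == given_deck[0][1]) and has_trump_card_flag:
--             return True
--     return False
-- ===== SOURCE B (Python) =====
-- def target_is_valid_deck(given_deck, trump_type):
--     if not given_deck:
--         return False
--     base = given_deck[0][1]
--     trump_positions = [i for i, el in enumerate(given_deck) if el[0] == trump_type]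
--     diff_positions = [i for i, el in enumerate(given_deck) if el[1] != base]
--     if not trump_positions or not diff_positions:
--         return False
--     return min(trump_positions) <= max(diff_positions)
-- ===== Notes on version B (the rewrite author's own statement) =====
-- stated objective: alternative
-- what changed: Instead of A's single flagged scan, B materialises the index sets of trump cards and of rank-differing cards and decides validity by the arithmetic comparison min(trump indices) <= max(differing indices).
import Mathlib
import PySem

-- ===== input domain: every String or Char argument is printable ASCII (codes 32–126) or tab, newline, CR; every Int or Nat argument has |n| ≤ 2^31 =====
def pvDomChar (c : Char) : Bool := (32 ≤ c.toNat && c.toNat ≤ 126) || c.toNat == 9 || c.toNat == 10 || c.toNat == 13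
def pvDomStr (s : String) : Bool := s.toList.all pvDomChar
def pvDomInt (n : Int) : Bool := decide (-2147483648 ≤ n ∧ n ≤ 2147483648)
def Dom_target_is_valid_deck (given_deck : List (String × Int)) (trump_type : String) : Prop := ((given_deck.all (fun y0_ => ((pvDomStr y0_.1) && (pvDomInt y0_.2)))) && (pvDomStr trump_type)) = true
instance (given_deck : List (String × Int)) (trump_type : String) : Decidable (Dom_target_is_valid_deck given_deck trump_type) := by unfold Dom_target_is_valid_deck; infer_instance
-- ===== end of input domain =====

-- B replaces A's single flagged scan by building the index sets of trump cards and of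
-- rank-differing cards and comparing min(trump indices) with max(differing indices);
-- objective: alternative algorithm, same O(n) cost.

-- ===== PORT A =====
-- loop of A: running flag, comparing each rank to the first card's rank (base)
def tivdLoopA (base : Int) (trump_type : String) : List (String × Int) → Bool → Bool
  | [], _ => false
  | e :: rest, flag =>
    let flag' := if e.1 == trump_type then true else flag
    if (!(e.2 == base)) && flag' then true else tivdLoopA base trump_type rest flag'

def target_is_valid_deck (given_deck : List (String × Int)) (trump_type : String) : Bool :=
  match given_deck with
  | [] => false
  | h :: _ => tivdLoopA h.2 trump_type given_deck false

-- ===== PORT B =====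
def target_is_valid_deck_alt (given_deck : List (String × Int)) (trump_type : String) : Bool :=
  match given_deck with
  | [] => false
  | h :: _ =>
    let trump_positions : List Int :=
      (PySem.List.enumerate given_deck).filterMap
        (fun p => if p.2.1 == trump_type then some p.1 else none)
    let diff_positions : List Int :=
      (PySem.List.enumerate given_deck).filterMap
        (fun p => if !(p.2.2 == h.2) then some p.1 else none)
    match PySem.List.min? trump_positions (fun x => x),
          PySem.List.max? diff_positions (fun x => x) with
    | some m, some M => decide (m ≤ M)
    | _, _ => false

-- ===== PRECONDITION & SPEC =====
def Spec_target_is_valid_deck (given_deck : List (String × Int)) (trump_type : String) (out : Bool) : Prop := out = target_is_valid_deck_alt given_deck trump_type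
instance (given_deck : List (String × Int)) (trump_type : String) (out : Bool) : Decidable (Spec_target_is_valid_deck given_deck trump_type out) := by unfold Spec_target_is_valid_deck; infer_instance

-- ===== CLAIM (what is proved, stated in full; the proofs are below) =====
def Claim_equal_target_is_valid_deck : Prop := ∀ (given_deck : List (String × Int)) (trump_type : String), Dom_target_is_valid_deck given_deck trump_type → Spec_target_is_valid_deck given_deck trump_type (target_is_valid_deck given_deck trump_type)

-- ===== LEMMAS AND PROOFS =====

-- once the flag is set, A's loop is just "any rank differs from base"
theorem tivdLoopA_true (base : Int) (t : String) (l : List (String × Int)) :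
    tivdLoopA base t l true = l.any (fun e => !(e.2 == base)) := by
  induction l with
  | nil => rfl
  | cons e rest ih =>
    simp only [tivdLoopA, List.any_cons]
    split <;> simp_all [Bool.beq_eq_decide_eq]

-- A's loop with flag unset equals "locate first trump, then scan the suffix"
theorem tivdLoopA_false (base : Int) (t : String) (l : List (String × Int)) :
    tivdLoopA base t l false =
      (match l.findIdx? (fun e => e.1 == t) with
       | none => false
       | some i => (l.drop i).any (fun e => !(e.2 == base))) := by
  induction l with
  | nil => rfl
  | cons e rest ih =>
    by_cases h : e.1 == t
    · simp only [tivdLoopA, List.findIdx?_cons, h, if_true, Bool.and_true,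
        tivdLoopA_true, List.drop_zero]
      by_cases hr : e.2 == base <;>
        simp [hr, List.any_cons, Bool.beq_eq_decide_eq] <;> simp_all
    · have h' : (e.1 == t) = false := by simpa using h
      simp only [tivdLoopA, List.findIdx?_cons, h', Bool.and_false,
        Bool.false_eq_true, if_neg (not_false), ih]
      cases hfi : rest.findIdx? (fun e => e.1 == t) with
      | none => simp
      | some i => simp

-- membership in an index comprehension
theorem mem_idxs {α : Type} (f : α → Bool) (l : List α) (s : Int) (x : Int) :
    x ∈ (PySem.List.enumerate l s).filterMap (fun p => if f p.2 then some p.1 else none) ↔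
      ∃ (k : Nat), ∃ (h : k < l.length), f l[k] ∧ x = s + k := by
  simp only [List.mem_filterMap, PySem.List.mem_enumerate_iff]
  constructor
  · rintro ⟨⟨a, b⟩, ⟨k, hk, hp⟩, hif⟩
    cases hp
    by_cases hf : f l[k] <;> simp [hf] at hif
    exact ⟨k, hk, hf, hif.symm⟩
  · rintro ⟨k, hk, hf, rfl⟩
    exact ⟨(s + k, l[k]), ⟨k, hk, rfl⟩, by simp [hf]⟩

-- the index comprehension is strictly increasing
theorem pairwise_idxs {α : Type} (f : α → Bool) (l : List α) (s : Int) :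
    ((PySem.List.enumerate l s).filterMap
        (fun p => if f p.2 then some p.1 else none)).Pairwise (· < ·) := by
  have h := PySem.List.pairwise_lt_enumerate (xs := l) (s := s)
  have h2 := List.Pairwise.filterMap (f := fun p : Int × α => if f p.2 then some p.1 else none)
    (R := fun p q : Int × α => p.1 < q.1) (S := (· < ·)) ?_ h
  · exact h2
  · intro a b hab x hx y hy
    by_cases ha : f a.2 <;> simp [ha] at hx
    by_cases hb : f b.2 <;> simp [hb] at hy
    omega

-- head of the index comprehension = first matching index
theorem head?_idxs {α : Type} (f : α → Bool) (l : List α) (s : Int) :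
    ((PySem.List.enumerate l s).filterMap
        (fun p => if f p.2 then some p.1 else none)).head? =
      (l.findIdx? f).map (fun i => s + (i : Int)) := by
  induction l generalizing s with
  | nil => rfl
  | cons x xs ih =>
    rw [PySem.List.enumerate_cons]
    by_cases hf : f x
    · simp [List.findIdx?_cons, hf]
    · have hfx : f x = false := by simpa using hf
      simp only [List.filterMap_cons, hfx, Bool.false_eq_true, if_false, List.findIdx?_cons]
      rw [ih (s + 1)]
      cases xs.findIdx? f <;> simp
      omega

-- folding min over a list the seed bounds below leaves the seed
theorem foldl_min_of_le (a : Int) (t : List Int) (h : ∀ y ∈ t, a ≤ y) :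
    t.foldl min a = a := by
  induction t generalizing a with
  | nil => rfl
  | cons b u ih =>
    rw [List.foldl_cons, min_eq_left (h b (by simp))]
    exact ih a (fun y hy => h y (by simp [hy]))

-- min? of a strictly increasing list is its head
theorem min?_of_sorted (l : List Int) (hl : l.Pairwise (· < ·)) :
    PySem.List.min? l (fun x => x) = l.head? := by
  cases l with
  | nil => exact (PySem.List.min?_eq_none_iff _ _).mpr rfl
  | cons a u =>
    rw [PySem.List.min?_id_cons,
      foldl_min_of_le a u (fun y hy => le_of_lt ((List.pairwise_cons.mp hl).1 y hy))]
    rfl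

-- any over a drop, by absolute index
theorem any_drop_iff {α : Type} (d : α → Bool) (l : List α) (i : Nat) :
    (l.drop i).any d = true ↔ ∃ (k : Nat), ∃ (h : k < l.length), i ≤ k ∧ d l[k] := by
  rw [List.any_eq_true]
  constructor
  · rintro ⟨x, hx, hdx⟩
    rcases List.mem_iff_getElem.mp hx with ⟨j, hj, rfl⟩
    refine ⟨i + j, by simp at hj; omega, by omega, ?_⟩
    rw [List.getElem_drop] at hdx
    convert hdx using 2
  · rintro ⟨k, hk, hik, hdk⟩
    refine ⟨l[k], ?_, hdk⟩
    have hklen : k - i < (l.drop i).length := by simp; omega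
    have : (l.drop i)[k - i] = l[k] := by
      rw [List.getElem_drop]; congr 1; omega
    rw [← this]
    exact List.getElem_mem hklen

-- ===== VERDICT (by name: the statement is the Claim_ definition above) =====
theorem target_is_valid_deck_spec : Claim_equal_target_is_valid_deck := by
  intro gd t _
  show target_is_valid_deck gd t = target_is_valid_deck_alt gd t
  cases gd with
  | nil => rfl
  | cons h rest =>
    have hA : target_is_valid_deck (h :: rest) t
        = tivdLoopA h.2 t (h :: rest) false := rfl
    have hB : target_is_valid_deck_alt (h :: rest) t =
        (match PySem.List.min? ((PySem.List.enumerate (h :: rest) 0).filterMap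
            (fun p => if p.2.1 == t then some p.1 else none)) (fun x => x),
          PySem.List.max? ((PySem.List.enumerate (h :: rest) 0).filterMap
            (fun p => if !(p.2.2 == h.2) then some p.1 else none)) (fun x => x) with
         | some m, some M => decide (m ≤ M)
         | _, _ => false) := rfl
    rw [hA, hB, tivdLoopA_false]
    have hmin : PySem.List.min? ((PySem.List.enumerate (h :: rest) 0).filterMap
        (fun p => if p.2.1 == t then some p.1 else none)) (fun x => x)
        = ((h :: rest).findIdx? (fun e => e.1 == t)).map Int.ofNat := by
      rw [min?_of_sorted _ (pairwise_idxs (fun e => e.1 == t) (h :: rest) 0),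
        head?_idxs (fun e => e.1 == t) (h :: rest) 0]
      cases (h :: rest).findIdx? (fun e => e.1 == t) <;> simp
    cases hfi : (h :: rest).findIdx? (fun e => e.1 == t) with
    | none =>
      rw [hmin, hfi]
      simp only [Option.map_none]
    | some i =>
      rw [hmin, hfi]
      simp only [Option.map_some]
      cases hmx : PySem.List.max? ((PySem.List.enumerate (h :: rest) 0).filterMap
          (fun p => if !(p.2.2 == h.2) then some p.1 else none)) (fun x => x) with
      | none =>
        have hdpnil := (PySem.List.max?_eq_none_iff _ _).mp hmx
        have hany : ((h :: rest).drop i).any (fun e => !(e.2 == h.2)) = false := by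
          rw [← Bool.not_eq_true, any_drop_iff]
          rintro ⟨k, hk, hik, hdk⟩
          have : ((k : Int)) ∈ ((PySem.List.enumerate (h :: rest) 0).filterMap
              (fun p => if !(p.2.2 == h.2) then some p.1 else none)) := by
            rw [mem_idxs (fun e => !(e.2 == h.2)) (h :: rest) 0]
            exact ⟨k, hk, hdk, by omega⟩
          rw [hdpnil] at this
          simp at this
        simp [hany]
      | some M =>
        have hMmem := PySem.List.max?_mem hmx
        have hMmax : ∀ y ∈ ((PySem.List.enumerate (h :: rest) 0).filterMap
            (fun p => if !(p.2.2 == h.2) then some p.1 else none)), y ≤ M :=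
          fun y hy => PySem.List.max?_isMax hmx y hy
        rcases (mem_idxs (fun e => !(e.2 == h.2)) (h :: rest) 0 M).mp hMmem
          with ⟨kM, hkM, hfkM, hMeq⟩
        by_cases hle : (i : Int) ≤ M
        · have hany : ((h :: rest).drop i).any (fun e => !(e.2 == h.2)) = true := by
            rw [any_drop_iff]
            exact ⟨kM, hkM, by omega, hfkM⟩
          simp [hany, hle]
        · have hany : ((h :: rest).drop i).any (fun e => !(e.2 == h.2)) = false := by
            rw [← Bool.not_eq_true, any_drop_iff]
            rintro ⟨k, hk, hik, hdk⟩
            have hkin : ((k : Int)) ∈ ((PySem.List.enumerate (h :: rest) 0).filterMap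
                (fun p => if !(p.2.2 == h.2) then some p.1 else none)) := by
              rw [mem_idxs (fun e => !(e.2 == h.2)) (h :: rest) 0]
              exact ⟨k, hk, hdk, by omega⟩
            have := hMmax _ hkin
            omega
          simp [hany, hle]
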